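-- pv_equiv track=rewrite | github.com/gary60182007/diu9u-obfuscator | rebuild_source2.py | _merge_redundant_ifs
-- ===== SOURCE A (Python) =====
-- def _merge_redundant_ifs(stmts):
--     active_conds = []
--     out = []
--     for s in stmts:
--         if s.startswith('if ') and s.endswith(' then'):
--             cond = s[3:-5].strip()
--             if cond in active_conds:
--                 continue
--             active_conds.append(cond)
--         out.append(s)
--     return out
-- ===== SOURCE B (Python) =====
-- def _merge_redundant_ifs(stmts):
--     # Forward-purge algorithm: walk a working buffer; whenever an
--     # 'if ... then' statement is kept, delete every LATER if-statement
--     # with the same condition from the buffer. No seen-set is maintained.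
--     buf = list(stmts)
--     i = 0
--     while i < len(buf):
--         s = buf[i]
--         if s.startswith('if ') and s.endswith(' then'):
--             c = s[3:-5].strip()
--             buf[i + 1:] = [t for t in buf[i + 1:]
--                            if not (t.startswith('if ') and t.endswith(' then')
--                                    and t[3:-5].strip() == c)]
--         i += 1
--     return buf
-- ===== Notes on version B (the rewrite author's own statement) =====
-- stated objective: alternative
-- what changed: Replaced A's accumulate-a-seen-list filter with a forward-purge scheme: walk a working buffer and, at each kept if-statement, destructively delete all later if-statements with the same condition, so no record of seen conditions is ever kept.
import Mathlib
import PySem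

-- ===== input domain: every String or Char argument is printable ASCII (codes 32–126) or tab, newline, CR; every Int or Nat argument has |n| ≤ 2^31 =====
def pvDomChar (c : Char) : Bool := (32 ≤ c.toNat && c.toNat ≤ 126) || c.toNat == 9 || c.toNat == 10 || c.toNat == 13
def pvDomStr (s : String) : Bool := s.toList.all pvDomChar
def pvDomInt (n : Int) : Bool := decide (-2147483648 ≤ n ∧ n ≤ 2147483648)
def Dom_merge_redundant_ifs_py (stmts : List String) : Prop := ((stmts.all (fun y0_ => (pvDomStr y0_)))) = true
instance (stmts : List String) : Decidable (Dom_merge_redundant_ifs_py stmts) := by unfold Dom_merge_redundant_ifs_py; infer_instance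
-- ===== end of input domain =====

-- B replaces A's seen-list accumulation by a forward-purge walk that deletes later
-- duplicate if-conditions from the working buffer (alternative algorithm; return values proved equal).

-- ===== PORT A =====
def merge_redundant_ifs_py (stmts : List String) : List String :=
  (stmts.foldl (fun (st : List String × List String) s =>
    if PySem.Str.startswith s "if " && PySem.Str.endswith s " then" then
      let cond := PySem.Str.strip (PySem.Str.slice s (some 3) (some (-5)))
      if st.1.contains cond then st
      else (st.1 ++ [cond], st.2 ++ [s])
    else (st.1, st.2 ++ [s])) ([], [])).2

-- ===== PORT B =====
-- the if-statement test and condition parse of Source B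
def pvIsIf (s : String) : Bool :=
  PySem.Str.startswith s "if " && PySem.Str.endswith s " then"
def pvParse (s : String) : String :=
  PySem.Str.strip (PySem.Str.slice s (some 3) (some (-5)))

-- Source B's while loop over the working buffer: each iteration takes the statement at the
-- cursor and, if it is an if-statement, deletes (slice assignment = filter) every later
-- if-statement with the same condition from the buffer; ported as recursion on the
-- suffix of the buffer still ahead of the cursor.
def merge_redundant_ifs_py_alt (stmts : List String) : List String :=
  match stmts with
  | [] => []
  | s :: rest =>
    if pvIsIf s then
      s :: merge_redundant_ifs_py_alt
        (rest.filter (fun t => !(pvIsIf t && pvParse t == pvParse s)))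
    else
      s :: merge_redundant_ifs_py_alt rest
termination_by stmts.length
decreasing_by
  · simpa using Nat.lt_succ_of_le (List.length_filter_le _ _)
  · simp

-- ===== PRECONDITION & SPEC =====
def Spec_merge_redundant_ifs_py (stmts : List String) (out : List String) : Prop := out = merge_redundant_ifs_py_alt stmts
instance (stmts : List String) (out : List String) : Decidable (Spec_merge_redundant_ifs_py stmts out) := by unfold Spec_merge_redundant_ifs_py; infer_instance

-- ===== CLAIM (what is proved, stated in full; the proofs are below) =====
def Claim_equal_merge_redundant_ifs_py : Prop := ∀ (stmts : List String), Dom_merge_redundant_ifs_py stmts → Spec_merge_redundant_ifs_py stmts (merge_redundant_ifs_py stmts)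

-- ===== LEMMAS AND PROOFS =====

-- parsed condition of a statement, if it is an if-statement
def pvCond (s : String) : Option String :=
  if pvIsIf s then some (pvParse s) else none

-- reference dedup: keep s unless its condition already occurred (A's strategy, recursively)
def pvRef (seen : List String) : List String → List String
  | [] => []
  | s :: rest =>
    match pvCond s with
    | none => s :: pvRef seen rest
    | some c => if seen.contains c then pvRef seen rest else s :: pvRef (seen ++ [c]) rest

theorem pvStepA_eq (st : List String × List String) (s : String) :
    (if PySem.Str.startswith s "if " && PySem.Str.endswith s " then" then
      let cond := PySem.Str.strip (PySem.Str.slice s (some 3) (some (-5)))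
      if st.1.contains cond then st
      else (st.1 ++ [cond], st.2 ++ [s])
    else (st.1, st.2 ++ [s]))
    = match pvCond s with
      | none => (st.1, st.2 ++ [s])
      | some c => if st.1.contains c then st else (st.1 ++ [c], st.2 ++ [s]) := by
  unfold pvCond pvIsIf pvParse
  split <;> rfl

theorem pvA_eq_ref (l : List String) : ∀ (active out : List String),
    (l.foldl (fun (st : List String × List String) s =>
      if PySem.Str.startswith s "if " && PySem.Str.endswith s " then" then
        let cond := PySem.Str.strip (PySem.Str.slice s (some 3) (some (-5)))
        if st.1.contains cond then st
        else (st.1 ++ [cond], st.2 ++ [s])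
      else (st.1, st.2 ++ [s])) (active, out)).2 = out ++ pvRef active l := by
  induction l with
  | nil => intro active out; simp [pvRef]
  | cons s rest ih =>
    intro active out
    rw [List.foldl_cons, pvStepA_eq (active, out) s]
    cases hs : pvCond s with
    | none => simp only [pvRef, hs, ih, List.append_assoc, List.singleton_append]
    | some c =>
      by_cases hc : (active.contains c) = true
      · simp only [hs, hc, if_true, pvRef, ih]
      · simp only [hs, hc, Bool.false_eq_true, if_false, pvRef, ih,
          List.append_assoc, List.singleton_append]

-- the statements of l that B's purges performed for the conditions in `seen` would have left
def pvP (seen : List String) (t : String) : Bool :=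
  match pvCond t with
  | none => true
  | some c => !(seen.contains c)

theorem pvP_combine (seen : List String) (c : String) (t : String) :
    (pvP seen t && !(pvIsIf t && pvParse t == c)) = pvP (seen ++ [c]) t := by
  unfold pvP pvCond
  by_cases h : pvIsIf t = true
  · rw [beq_eq_decide]; simp [h, Bool.and_comm]
  · simp [h]

theorem pvFilter_combine (seen : List String) (c : String) (rest : List String) :
    ((rest.filter (pvP seen)).filter (fun t => !(pvIsIf t && pvParse t == c)))
    = rest.filter (pvP (seen ++ [c])) := by
  rw [List.filter_filter]
  exact List.filter_congr (fun t _ => by rw [Bool.and_comm]; exact pvP_combine seen c t)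

theorem pvRef_eq_alt (l : List String) : ∀ (seen : List String),
    pvRef seen l = merge_redundant_ifs_py_alt (l.filter (pvP seen)) := by
  induction l with
  | nil => intro seen; simp [pvRef, merge_redundant_ifs_py_alt]
  | cons s rest ih =>
    intro seen
    cases hs : pvCond s with
    | none =>
      have hIf : pvIsIf s = false := by
        unfold pvCond at hs; by_cases h : pvIsIf s = true <;> simp [h] at hs ⊢
      have hp : pvP seen s = true := by simp [pvP, hs]
      rw [List.filter_cons_of_pos hp]
      rw [merge_redundant_ifs_py_alt]
      simp only [hIf, Bool.false_eq_true, if_false]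
      simp only [pvRef, hs, ih seen]
    | some c =>
      have hIf : pvIsIf s = true := by
        unfold pvCond at hs; by_cases h : pvIsIf s = true <;> simp [h] at hs ⊢
      have hpc : pvParse s = c := by
        unfold pvCond at hs; simp [hIf] at hs; exact hs
      by_cases hc : (seen.contains c) = true
      · have hc' : c ∈ seen := by simpa [List.contains_iff_mem] using hc
        have hp : pvP seen s = false := by simp [pvP, hs, hc']
        rw [List.filter_cons_of_neg (by simp [hp])]
        simp only [pvRef, hs, hc, if_true, ih seen]
      · have hc' : c ∉ seen := by simpa [List.contains_iff_mem] using hc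
        have hp : pvP seen s = true := by simp [pvP, hs, hc']
        rw [List.filter_cons_of_pos hp]
        rw [merge_redundant_ifs_py_alt]
        simp only [hIf, if_true, hpc]
        rw [pvFilter_combine seen c rest]
        simp only [pvRef, hs, hc, Bool.false_eq_true, if_false, ih (seen ++ [c])]

-- ===== VERDICT (by name: the statement is the Claim_ definition above) =====
theorem merge_redundant_ifs_py_spec : Claim_equal_merge_redundant_ifs_py := by
  intro stmts _
  unfold Spec_merge_redundant_ifs_py merge_redundant_ifs_py
  rw [pvA_eq_ref stmts [] [], pvRef_eq_alt stmts []]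
  have : stmts.filter (pvP []) = stmts :=
    List.filter_eq_self.mpr (fun t _ => by unfold pvP; cases pvCond t <;> simp)
  rw [this]
  rfl
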